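-- pv_equiv track=rewrite | github.com/MarbleSodas/Godoty | backend/app/tools/godot_tools.py | _extract_search_snippet
-- ===== SOURCE A (Python) =====
-- from typing import Dict, List, Optional, Any
--
-- def _extract_search_snippet(content: str, search_terms: List[str]) -> str:
--     """Extract a relevant snippet from content based on search terms."""
--     lines = content.split('\n')
--
--     best_line_idx = -1
--     best_score = 0
--
--     for i, line in enumerate(lines):
--         score = sum(1 for term in search_terms if term in line.lower())
--         if score > best_score:
--             best_score = score
--             best_line_idx = i
--
--     if best_line_idx >= 0:
--         # Return snippet around the best matching line
--         start = max(0, best_line_idx - 2)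
--         end = min(len(lines), best_line_idx + 3)
--         return '\n'.join(lines[start:end])
--
--     return ""
-- ===== SOURCE B (Python) =====
-- from typing import List
--
-- def _extract_search_snippet(content: str, search_terms: List[str]) -> str:
--     """Extract a relevant snippet from content based on search terms."""
--     lines = content.split('\n')
--     # term-major accumulation: lowercase each line once, then let every term
--     # bump the score of each line it occurs in
--     lowered = [line.lower() for line in lines]
--     scores = [0] * len(lines)
--     for term in search_terms:
--         for i, low in enumerate(lowered):
--             if term in low:
--                 scores[i] += 1
--     best = max(scores)
--     if best == 0:
--         return ""
--     best_line_idx = scores.index(best)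
--     start = max(0, best_line_idx - 2)
--     end = min(len(lines), best_line_idx + 3)
--     return '\n'.join(lines[start:end])
-- ===== Notes on version B (the rewrite author's own statement) =====
-- stated objective: faster
-- what changed: A's line-major greedy pass (score each line on the fly, recomputing line.lower() per term, tracking a running best) is replaced by a term-major accumulation: lines are lowercased once, each term bumps a score table over all lines, then max(scores)/scores.index picks the first best line; same window slicing.
import Mathlib
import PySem

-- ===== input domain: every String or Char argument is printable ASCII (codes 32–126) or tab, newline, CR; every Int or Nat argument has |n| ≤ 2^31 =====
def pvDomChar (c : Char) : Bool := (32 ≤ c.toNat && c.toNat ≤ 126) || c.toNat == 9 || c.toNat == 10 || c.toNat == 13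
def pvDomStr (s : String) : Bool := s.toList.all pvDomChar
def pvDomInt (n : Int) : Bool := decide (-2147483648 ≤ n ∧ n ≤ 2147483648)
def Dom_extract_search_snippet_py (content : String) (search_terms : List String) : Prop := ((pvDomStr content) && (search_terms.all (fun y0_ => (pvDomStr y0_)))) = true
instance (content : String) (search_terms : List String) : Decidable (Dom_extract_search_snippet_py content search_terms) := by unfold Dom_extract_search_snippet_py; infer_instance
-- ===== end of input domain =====

-- B replaces A's line-major greedy pass (score each line on the fly, track the running
-- best) by a term-major accumulation: lines are lowercased once, each term bumps a score
-- table over all lines, then max/first-index picks the best line (objective: faster by a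
-- constant factor — each line is lowercased once instead of once per term; measured).

-- ===== PORT A =====
-- A's inline `sum(1 for term in search_terms if term in line.lower())`
def pvLineScore (search_terms : List String) (line : String) : Int :=
  search_terms.foldl
    (fun acc term => if PySem.Str.isIn term (PySem.Str.lower line) then acc + 1 else acc) 0

def extract_search_snippet_py (content : String) (search_terms : List String) : String :=
  match PySem.Str.split? content "\n" with   -- sep is the nonempty literal "\n": never none
  | none => ""
  | some lines =>
    let st := (PySem.List.enumerate lines 0).foldl
      (fun (st : Int × Int) p =>
        let score := pvLineScore search_terms p.2
        if score > st.2 then (p.1, score) else st) (-1, 0)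
    if st.1 ≥ 0 then
      let start := max 0 (st.1 - 2)
      let stop := min ((lines.length : Int)) (st.1 + 3)
      PySem.Str.join "\n" (PySem.List.slice lines (some start) (some stop))
    else ""

-- ===== PORT B =====
def extract_search_snippet_py_alt (content : String) (search_terms : List String) : String :=
  match PySem.Str.split? content "\n" with   -- sep is the nonempty literal "\n": never none
  | none => ""
  | some lines =>
    let lowered := lines.map PySem.Str.lower
    -- `for term: for i, low in enumerate(lowered): if term in low: scores[i] += 1`,
    -- the indexed in-place update walking positions of scores/lowered in lockstep
    let scores := search_terms.foldl
      (fun sc term =>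
        List.zipWith (fun s low => if PySem.Str.isIn term low then s + 1 else s) sc lowered)
      (List.replicate lines.length (0 : Int))
    match PySem.List.max? scores (fun y => y) with
    | none => ""          -- unreachable: lines (hence scores) is nonempty
    | some best =>
      if best == 0 then ""
      else
        match PySem.List.index? scores best with
        | none => ""      -- unreachable: best is an element of scores
        | some best_line_idx =>
          let start := max 0 ((best_line_idx : Int) - 2)
          let stop := min ((lines.length : Int)) ((best_line_idx : Int) + 3)
          PySem.Str.join "\n" (PySem.List.slice lines (some start) (some stop))

-- ===== PRECONDITION & SPEC =====
def Spec_extract_search_snippet_py (content : String) (search_terms : List String) (out : String) : Prop := out = extract_search_snippet_py_alt content search_terms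
instance (content : String) (search_terms : List String) (out : String) : Decidable (Spec_extract_search_snippet_py content search_terms out) := by unfold Spec_extract_search_snippet_py; infer_instance

-- ===== CLAIM (what is proved, stated in full; the proofs are below) =====
def Claim_equal_extract_search_snippet_py : Prop := ∀ (content : String) (search_terms : List String), Dom_extract_search_snippet_py content search_terms → Spec_extract_search_snippet_py content search_terms (extract_search_snippet_py content search_terms)

-- ===== LEMMAS AND PROOFS =====

-- line scores are nonnegative
theorem pvLineScore_nonneg_aux (search_terms : List String) (line : String) :
    ∀ acc : Int, acc ≤ search_terms.foldl
      (fun acc term => if PySem.Str.isIn term (PySem.Str.lower line) then acc + 1 else acc) acc := by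
  induction search_terms with
  | nil => intro acc; simp
  | cons t ts ih =>
    intro acc
    simp only [List.foldl_cons]
    split
    · exact le_trans (by omega) (ih (acc + 1))
    · exact ih acc

theorem pvLineScore_nonneg (search_terms : List String) (line : String) :
    0 ≤ pvLineScore search_terms line :=
  pvLineScore_nonneg_aux search_terms line 0

-- a running foldl-max is attained by the seed or by an element
theorem foldl_max_mem {α : Type} [LinearOrder α] (t : List α) (x : α) :
    t.foldl max x = x ∨ t.foldl max x ∈ t := by
  induction t generalizing x with
  | nil => simp
  | cons y t ih =>
    simp only [List.foldl_cons]
    rcases ih (max x y) with h | h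
    · rw [h]
      rcases max_cases x y with ⟨he, _⟩ | ⟨he, _⟩
      · exact Or.inl he
      · exact Or.inr (by rw [he]; exact List.mem_cons_self)
    · exact Or.inr (List.mem_cons_of_mem y h)

-- enumerate commutes with map
theorem enumerate_map {α β : Type} (f : α → β) (ls : List α) (k : Int) :
    PySem.List.enumerate (ls.map f) k
      = (PySem.List.enumerate ls k).map (fun p => (p.1, f p.2)) := by
  induction ls generalizing k with
  | nil => simp [PySem.List.enumerate]
  | cons x xs ih => simp [PySem.List.enumerate_cons, ih]

theorem foldl_max_mem_cons (x : Int) (t : List Int) : t.foldl max x ∈ x :: t := by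
  rcases foldl_max_mem t x with h | h
  · rw [h]; exact List.mem_cons_self
  · exact List.mem_cons_of_mem x h

-- nested zipWith over the same right-hand list fuses
theorem zipWith_zipWith_same {α β γ δ : Type} (f : γ → β → δ) (g : α → β → γ)
    (sc : List α) (low : List β) :
    List.zipWith f (List.zipWith g sc low) low
      = List.zipWith (fun s l => f (g s l) l) sc low := by
  induction sc generalizing low with
  | nil => simp
  | cons s sc ih =>
    cases low with
    | nil => simp
    | cons l low => simp [ih]

theorem zipWith_fst_of_length_eq {α β : Type} (sc : List α) (low : List β)
    (hlen : sc.length = low.length) : List.zipWith (fun s _ => s) sc low = sc := by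
  induction sc generalizing low with
  | nil => simp
  | cons s sc ih =>
    cases low with
    | nil => simp at hlen
    | cons l low =>
      simp only [List.zipWith_cons_cons, List.cons.injEq, true_and]
      exact ih low (by simpa using hlen)

-- B's term-major accumulation, characterised pointwise
theorem termFold_zipWith (terms : List String) :
    ∀ (sc : List Int) (low : List String), sc.length = low.length →
    terms.foldl
        (fun sc term =>
          List.zipWith (fun s l => if PySem.Str.isIn term l then s + 1 else s) sc low) sc
      = List.zipWith
          (fun s l => terms.foldl (fun a t => if PySem.Str.isIn t l then a + 1 else a) s)
          sc low := by
  induction terms with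
  | nil =>
    intro sc low hlen
    simp only [List.foldl_nil]
    exact (zipWith_fst_of_length_eq sc low hlen).symm
  | cons t ts ih =>
    intro sc low hlen
    simp only [List.foldl_cons]
    rw [ih _ low (by simp [hlen]), zipWith_zipWith_same]

theorem zipWith_replicate_length {α β : Type} (f : α → β → α) (c : α) (l : List β) :
    List.zipWith f (List.replicate l.length c) l = l.map (f c) := by
  induction l with
  | nil => simp
  | cons x xs ih => simp [List.replicate_succ, ih]

-- B's score table equals the per-line score map A computes on the fly
theorem scores_eq_map (search_terms : List String) (lines : List String) :
    search_terms.foldl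
        (fun sc term =>
          List.zipWith (fun s low => if PySem.Str.isIn term low then s + 1 else s) sc
            (lines.map PySem.Str.lower))
        (List.replicate lines.length (0 : Int))
      = lines.map (pvLineScore search_terms) := by
  rw [show List.replicate lines.length (0 : Int)
        = List.replicate (lines.map PySem.Str.lower).length (0 : Int) by simp]
  rw [termFold_zipWith search_terms _ (lines.map PySem.Str.lower) (by simp),
      zipWith_replicate_length]
  simp [pvLineScore, Function.comp]

-- characterisation of A's greedy best-tracking loop over the score list
theorem loopA_spec (xs : List Int) : ∀ (k bi bs : Int), 0 ≤ bs →
    (PySem.List.enumerate xs k).foldl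
        (fun (st : Int × Int) p => if p.2 > st.2 then p else st) (bi, bs)
      = match xs with
        | [] => (bi, bs)
        | x :: t =>
          let M := t.foldl max x
          if bs < M then (k + (((PySem.List.index? xs M).getD 0 : Nat) : Int), M)
          else (bi, bs) := by
  induction xs with
  | nil => intro k bi bs _; simp [PySem.List.enumerate]
  | cons x t ih =>
    intro k bi bs hbs
    rw [PySem.List.enumerate_cons]
    simp only [List.foldl_cons]
    by_cases hx : x > bs
    · simp only [hx, if_true]
      rw [ih (k + 1) k x (by omega)]
      cases t with
      | nil =>
        simp only [List.foldl_nil]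
        rw [if_pos hx, PySem.List.index?_cons_self]
        simp
      | cons y t' =>
        simp only
        set M' := t'.foldl max y with hM'
        have hfold : (y :: t').foldl max x = max x M' := by
          simp only [List.foldl_cons, hM']
          exact List.foldl_assoc
        rw [hfold]
        by_cases hlt : x < M'
        · have hmax : max x M' = M' := max_eq_right (le_of_lt hlt)
          rw [hmax, if_pos hlt, if_pos (show bs < M' by omega)]
          have hne : x ≠ M' := ne_of_lt hlt
          obtain ⟨j, hj⟩ := Option.isSome_iff_exists.1
            ((PySem.List.index?_isSome_iff (xs := y :: t') (v := M')).2
              (hM' ▸ foldl_max_mem_cons y t'))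
          rw [PySem.List.index?_cons_of_ne _ hne, hj]
          simp only [Option.map_some, Option.getD_some, Prod.mk.injEq]
          constructor
          · push_cast; ring
          · trivial
        · have hmax : max x M' = x := max_eq_left (le_of_not_gt hlt)
          rw [hmax, if_neg hlt, if_pos hx, PySem.List.index?_cons_self]
          simp
    · simp only [hx, if_false]
      rw [ih (k + 1) bi bs hbs]
      have hxle : x ≤ bs := le_of_not_gt hx
      cases t with
      | nil =>
        simp only [List.foldl_nil]
        rw [if_neg (show ¬ bs < x by omega)]
      | cons y t' =>
        simp only
        set M' := t'.foldl max y with hM'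
        have hfold : (y :: t').foldl max x = max x M' := by
          simp only [List.foldl_cons, hM']
          exact List.foldl_assoc
        rw [hfold]
        by_cases hlt : bs < M'
        · have hmax : max x M' = M' := max_eq_right (by omega)
          rw [hmax, if_pos hlt, if_pos hlt]
          have hne : x ≠ M' := by omega
          obtain ⟨j, hj⟩ := Option.isSome_iff_exists.1
            ((PySem.List.index?_isSome_iff (xs := y :: t') (v := M')).2
              (hM' ▸ foldl_max_mem_cons y t'))
          rw [PySem.List.index?_cons_of_ne _ hne, hj]
          simp only [Option.map_some, Option.getD_some, Prod.mk.injEq]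
          constructor
          · push_cast; ring
          · trivial
        · have hnmax : ¬ bs < max x M' := by
            rcases max_cases x M' with ⟨he, _⟩ | ⟨he, _⟩ <;> omega
          rw [if_neg hlt, if_neg hnmax]

-- ===== VERDICT (by name: the statement is the Claim_ definition above) =====
theorem extract_search_snippet_py_spec : Claim_equal_extract_search_snippet_py := by
  intro content search_terms _
  unfold Spec_extract_search_snippet_py
  unfold extract_search_snippet_py extract_search_snippet_py_alt
  cases hsplit : PySem.Str.split? content "\n" with
  | none => rfl
  | some lines =>
    simp only
    rw [scores_eq_map]
    -- rewrite A's loop over (index, line) pairs as a loop over the score list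
    have hfold :
        (PySem.List.enumerate lines 0).foldl
          (fun (st : Int × Int) p =>
            let score := pvLineScore search_terms p.2
            if score > st.2 then (p.1, score) else st) (-1, 0)
        = (PySem.List.enumerate (lines.map (pvLineScore search_terms)) 0).foldl
            (fun (st : Int × Int) p => if p.2 > st.2 then p else st) (-1, 0) := by
      rw [enumerate_map, List.foldl_map]
    rw [hfold, loopA_spec _ 0 (-1) 0 le_rfl]
    cases hl : lines with
    | nil => rfl
    | cons l ls =>
      simp only [List.map_cons]
      rw [PySem.List.max?_id_cons]
      have hx0 : 0 ≤ pvLineScore search_terms l := pvLineScore_nonneg _ _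
      have hxM := (PySem.List.le_foldl_max
        (List.map (pvLineScore search_terms) ls) (pvLineScore search_terms l)).1
      by_cases hpos : 0 < List.foldl max (pvLineScore search_terms l)
          (List.map (pvLineScore search_terms) ls)
      · obtain ⟨j, hj⟩ := Option.isSome_iff_exists.1
          ((PySem.List.index?_isSome_iff
            (xs := pvLineScore search_terms l :: List.map (pvLineScore search_terms) ls)
            (v := List.foldl max (pvLineScore search_terms l)
              (List.map (pvLineScore search_terms) ls))).2
            (foldl_max_mem_cons _ _))
        have hbne : ((List.foldl max (pvLineScore search_terms l)
            (List.map (pvLineScore search_terms) ls)) == (0 : Int)) = false := by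
          exact beq_eq_false_iff_ne.mpr (by omega)
        rw [if_pos hpos, hj]
        simp only [Option.getD_some]
        rw [if_pos (show (0 : Int) + (j : Int) ≥ 0 by positivity), hbne]
        simp only [Bool.false_eq_true, if_false, hj, zero_add]
      · have hM0 : List.foldl max (pvLineScore search_terms l)
            (List.map (pvLineScore search_terms) ls) = 0 := by omega
        rw [if_neg hpos, hM0]
        simp
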